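-- pv_equiv track=rewrite | github.com/Radha-982/Fresh | CodeParser/CodeUtility/Metrics.py | comment_density
-- ===== SOURCE A (Python) =====
-- import math
--
-- def comment_density(file_text):
--     a=list(file_text.split("\n"))
--     com_len=[]
--     count=0
--     for i in range(len(a)):
--         if(a[i].strip(' ').startswith("#") or a[i].strip(" ").startswith("'''")):
--
--             com_len.append(i-count)
--             count=i
--     if(len(com_len)>0):
--         return math.ceil(sum(com_len)/len(com_len))
--     else:
--         return 0
-- ===== SOURCE B (Python) =====
-- def comment_density(file_text):
--     idx = [i for i, line in enumerate(file_text.split("\n"))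
--            if line.strip(' ').startswith(("#", "'''"))]
--     return -(-idx[-1] // len(idx)) if idx else 0
-- ===== Notes on version B (the rewrite author's own statement) =====
-- stated objective: simpler
-- what changed: A's appended gap list telescopes (its sum is the index of the last comment line), so B collects the comment-line indices with one comprehension and returns ceil(last_index/count) by integer arithmetic, with no index loop, gap list or summation.
import Mathlib
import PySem

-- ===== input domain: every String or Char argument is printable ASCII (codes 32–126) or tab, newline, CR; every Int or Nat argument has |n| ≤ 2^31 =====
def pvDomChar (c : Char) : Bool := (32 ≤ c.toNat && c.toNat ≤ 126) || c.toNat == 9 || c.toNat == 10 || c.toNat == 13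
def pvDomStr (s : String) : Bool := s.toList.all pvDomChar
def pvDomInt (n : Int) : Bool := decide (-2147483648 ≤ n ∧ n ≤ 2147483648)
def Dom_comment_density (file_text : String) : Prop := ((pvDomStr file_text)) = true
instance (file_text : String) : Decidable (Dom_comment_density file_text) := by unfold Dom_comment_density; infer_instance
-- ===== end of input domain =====

-- B replaces A's index loop that accumulates a gap list (whose sum telescopes to the
-- index of the last comment line) by one comprehension collecting comment-line indices,
-- returning ceil(last index / count): simpler, no gap list or summation.

-- ===== PORT A =====
-- split("\n") with a nonempty separator never raises: split? is some here, getD's default is unreachable.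
-- math.ceil(sum/len) is ported as the exact integer ceiling -((-sum)//len); exact wherever the
-- Python float division is (all inputs whose line count is far below 2^53).
def comment_density (file_text : String) : Int :=
  let a := (PySem.Str.split? file_text "\n").getD []
  let st := (PySem.List.pyRange 0 (PySem.List.len a) 1).foldl
    (fun (s : List Int × Int) i =>
      if PySem.Str.startswith (PySem.Str.stripChars (PySem.List.pyGetD a i "") " ") "#"
         || PySem.Str.startswith (PySem.Str.stripChars (PySem.List.pyGetD a i "") " ") "'''"
      then (s.1 ++ [i - s.2], i) else s) ([], 0)
  if st.1.length > 0 then -(PySem.Int.floordiv (-(st.1.sum)) (st.1.length : Int)) else 0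

-- ===== PORT B =====
-- the tuple startswith ("#", "'''") is ported as the disjunction of the two startswith tests;
-- idx[-1] on the nonempty list is its last element.
def comment_density_alt (file_text : String) : Int :=
  let idx := (PySem.List.enumerate ((PySem.Str.split? file_text "\n").getD []) 0).filterMap
    (fun p =>
      if PySem.Str.startswith (PySem.Str.stripChars p.2 " ") "#"
         || PySem.Str.startswith (PySem.Str.stripChars p.2 " ") "'''"
      then some p.1 else none)
  match idx.getLast? with
  | some last => -(PySem.Int.floordiv (-last) (idx.length : Int))
  | none => 0

-- ===== PRECONDITION & SPEC =====
def Spec_comment_density (file_text : String) (out : Int) : Prop := out = comment_density_alt file_text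
instance (file_text : String) (out : Int) : Decidable (Spec_comment_density file_text out) := by unfold Spec_comment_density; infer_instance

-- ===== CLAIM (what is proved, stated in full; the proofs are below) =====
def Claim_equal_comment_density : Prop := ∀ (file_text : String), Dom_comment_density file_text → Spec_comment_density file_text (comment_density file_text)

-- ===== LEMMAS AND PROOFS =====

-- Loop invariant relating A's (gap list, count) fold over the enumerated lines to B's
-- filtered index list idx: A's gap list grows by |idx| entries, A's final count is the
-- last filtered index (or the initial count), and the gap list telescopes (its sum grows
-- by exactly the change of count).
theorem pv_fold_inv (q : String → Bool) (ps : List (Int × String)) (l : List Int) (c : Int) :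
    (ps.foldl (fun (s : List Int × Int) p => if q p.2 then (s.1 ++ [p.1 - s.2], p.1) else s) (l, c)).1.length
      = l.length + (ps.filterMap (fun p => if q p.2 then some p.1 else none)).length
    ∧ (ps.foldl (fun (s : List Int × Int) p => if q p.2 then (s.1 ++ [p.1 - s.2], p.1) else s) (l, c)).2
      = ((ps.filterMap (fun p => if q p.2 then some p.1 else none)).getLast?).getD c
    ∧ (ps.foldl (fun (s : List Int × Int) p => if q p.2 then (s.1 ++ [p.1 - s.2], p.1) else s) (l, c)).1.sum
      = l.sum + ((ps.foldl (fun (s : List Int × Int) p => if q p.2 then (s.1 ++ [p.1 - s.2], p.1) else s) (l, c)).2 - c) := by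
  induction ps generalizing l c with
  | nil => simp
  | cons p ps ih =>
    by_cases h : q p.2 = true
    · simp only [List.foldl_cons, List.filterMap_cons, h, if_pos]
      refine ⟨?_, ?_, ?_⟩
      · rw [(ih (l ++ [p.1 - c]) p.1).1]
        simp only [List.length_append, List.length_cons, List.length_nil]
        omega
      · have h2 := (ih (l ++ [p.1 - c]) p.1).2.1
        rw [h2]
        cases hfm : ps.filterMap (fun p => if q p.2 then some p.1 else none) with
        | nil => simp
        | cons x xs =>
          simp [List.getLast?_eq_some_getLast (l := x :: xs) (by simp)]
      · have h3 := (ih (l ++ [p.1 - c]) p.1).2.2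
        simp only [List.sum_append, List.sum_cons, List.sum_nil] at h3
        omega
    · simp only [List.foldl_cons, List.filterMap_cons, h, Bool.false_eq_true, if_false]
      exact ih l c

-- ===== VERDICT (by name: the statement is the Claim_ definition above) =====
theorem comment_density_spec : Claim_equal_comment_density := by
  intro file_text _
  unfold Spec_comment_density comment_density comment_density_alt
  generalize ha : (PySem.Str.split? file_text "\n").getD [] = a
  set q : String → Bool := fun line =>
    PySem.Str.startswith (PySem.Str.stripChars line " ") "#"
      || PySem.Str.startswith (PySem.Str.stripChars line " ") "'''" with hq
  -- turn A's index fold over pyRange into a fold over the enumerated lines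
  have hA : (PySem.List.pyRange 0 (PySem.List.len a) 1).foldl
      (fun (s : List Int × Int) i =>
        if PySem.Str.startswith (PySem.Str.stripChars (PySem.List.pyGetD a i "") " ") "#"
           || PySem.Str.startswith (PySem.Str.stripChars (PySem.List.pyGetD a i "") " ") "'''"
        then (s.1 ++ [i - s.2], i) else s) ([], 0)
      = (PySem.List.enumerate a 0).foldl
        (fun (s : List Int × Int) p => if q p.2 then (s.1 ++ [p.1 - s.2], p.1) else s) ([], 0) := by
    rw [PySem.List.enumerate_eq_map_pyRange a ""]
    rw [List.foldl_map]
  dsimp only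
  rw [hA]
  have hinv := pv_fold_inv q (PySem.List.enumerate a 0) [] 0
  set rA := (PySem.List.enumerate a 0).foldl
    (fun (s : List Int × Int) p => if q p.2 then (s.1 ++ [p.1 - s.2], p.1) else s) ([], 0) with hrA
  set idx := (PySem.List.enumerate a 0).filterMap
    (fun p => if q p.2 then some p.1 else none) with hidx
  obtain ⟨h1, h2, h3⟩ := hinv
  simp only [List.length_nil, Nat.zero_add, List.sum_nil, Int.zero_add, Int.sub_zero] at h1 h2 h3
  cases hlast : idx.getLast? with
  | none =>
    have : idx = [] := List.getLast?_eq_none_iff.mp hlast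
    rw [this] at h1
    simp [h1]
  | some last =>
    have hne : idx ≠ [] := by
      intro h0; rw [h0] at hlast; simp at hlast
    have hpos : 0 < rA.1.length := by
      rw [h1]
      exact List.length_pos_iff.mpr hne
    rw [if_pos hpos, h3, h2, hlast, h1]
    rfl
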